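-- pv_equiv track=rewrite | github.com/hz336/Algorithm | LintCode/DFS/Word Search II.py | get_prefix_set
-- ===== SOURCE A (Python) =====
-- def get_prefix_set(words):
--     prefix_set = {}
--     for word in words:
--         for i in range(len(word) - 1):
--             prefix = word[: i + 1]
--             if prefix not in prefix_set:
--                 prefix_set[prefix] = False
--
--         prefix_set[word] = True
--
--     return prefix_set
-- ===== SOURCE B (Python) =====
-- def get_prefix_set(words):
--     # Stage 1: build the ordered list of distinct keys (every prefix, shortest
--     # first, in first-occurrence order) by scanning characters and growing an
--     # accumulator, with an explicit seen-set for dedup.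
--     word_set = set(words)
--     ordered = []
--     seen = set()
--     for w in words:
--         acc = ""
--         for ch in w:
--             acc += ch
--             if acc not in seen:
--                 seen.add(acc)
--                 ordered.append(acc)
--         if w not in seen:  # only reachable for the empty word
--             seen.add(w)
--             ordered.append(w)
--     # Stage 2: one membership pass gives every key its value.
--     return {k: k in word_set for k in ordered}
-- ===== Notes on version B (the rewrite author's own statement) =====
-- stated objective: alternative
-- what changed: A builds the dict directly, conditionally inserting index-based slice prefixes as False and overwriting each word as True; B instead runs staged passes: it first produces the deduplicated ordered key list by growing each prefix character by character against an explicit seen-set, then builds the dict in one membership pass over a precomputed word set.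
import Mathlib
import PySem

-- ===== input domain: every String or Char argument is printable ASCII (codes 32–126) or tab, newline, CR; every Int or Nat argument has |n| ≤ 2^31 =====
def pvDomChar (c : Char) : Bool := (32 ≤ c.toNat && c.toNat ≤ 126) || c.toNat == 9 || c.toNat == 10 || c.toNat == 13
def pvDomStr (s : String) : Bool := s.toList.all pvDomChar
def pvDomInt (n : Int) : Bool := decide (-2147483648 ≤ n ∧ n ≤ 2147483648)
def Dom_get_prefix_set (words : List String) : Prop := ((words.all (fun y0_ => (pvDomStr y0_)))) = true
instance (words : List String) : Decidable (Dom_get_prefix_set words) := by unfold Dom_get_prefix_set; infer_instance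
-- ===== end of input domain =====

-- B replaces A's direct dict construction (conditional slice-prefix inserts, word overwritten as True)
-- by staged passes: build the deduplicated ordered key list by growing each prefix character by
-- character against a seen-set, then one membership pass over a precomputed word set (objective:
-- alternative; the resulting dict, including insertion order, is proved identical).

-- ===== PORT A =====
def get_prefix_set (words : List String) : List (String × Bool) :=
  (words.foldl
    (fun prefix_set word =>
      ((PySem.List.pyRange 0 ((PySem.Str.len word : Int) - 1) 1).foldl
        (fun d i =>
          let pre := PySem.Str.slice word none (some (i + 1))
          if d.contains pre then d else d.insert pre false) prefix_set).insert word true)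
    PySem.Dict.empty).items

-- ===== PORT B =====
-- 'acc += ch' is carried on the List Char side (exact: Python string concat of the word's chars),
-- with String.ofList producing each key.
def get_prefix_set_alt (words : List String) : List (String × Bool) :=
  let wordSet : PySem.Set String := PySem.Set.ofList words
  let st :=
    words.foldl
      (fun (st : List String × PySem.Set String) w =>
        let t :=
          w.toList.foldl
            (fun (t : List Char × List String × PySem.Set String) ch =>
              let acc := t.1 ++ [ch]
              let s := String.ofList acc
              if PySem.Set.contains t.2.2 s then (acc, t.2.1, t.2.2)
              else (acc, t.2.1 ++ [s], PySem.Set.add t.2.2 s))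
            (([] : List Char), st.1, st.2)
        if PySem.Set.contains t.2.2 w then t.2
        else (t.2.1 ++ [w], PySem.Set.add t.2.2 w))
      (([] : List String), (PySem.Set.empty : PySem.Set String))
  st.1.map (fun k => (k, PySem.Set.contains wordSet k))

-- ===== PRECONDITION & SPEC =====
def Spec_get_prefix_set (words : List String) (out : List (String × Bool)) : Prop := out = get_prefix_set_alt words
instance (words : List String) (out : List (String × Bool)) : Decidable (Spec_get_prefix_set words out) := by unfold Spec_get_prefix_set; infer_instance

-- ===== CLAIM (what is proved, stated in full; the proofs are below) =====
def Claim_equal_get_prefix_set : Prop := ∀ (words : List String), Dom_get_prefix_set words → Spec_get_prefix_set words (get_prefix_set words)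

-- ===== LEMMAS AND PROOFS =====

-- A's conditional "insert prefix as False if absent" step.
def pvCondIns (d : PySem.Dict String Bool) (p : String) : PySem.Dict String Bool :=
  if d.contains p then d else d.insert p false

-- the list of proper prefixes of w, as A enumerates them
def pvPrefs (w : String) : List String :=
  (PySem.List.pyRange 0 ((PySem.Str.len w : Int) - 1) 1).map
    (fun i => PySem.Str.slice w none (some (i + 1)))

-- all nonempty prefixes of w, as B's character loop enumerates them
def pvAllPrefs (w : String) : List String :=
  (List.range w.toList.length).map (fun i => String.ofList (w.toList.take (i + 1)))

-- B's per-character step and per-word step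
def pvChStep (t : List Char × List String × PySem.Set String) (ch : Char) :
    List Char × List String × PySem.Set String :=
  let acc := t.1 ++ [ch]
  let s := String.ofList acc
  if PySem.Set.contains t.2.2 s then (acc, t.2.1, t.2.2)
  else (acc, t.2.1 ++ [s], PySem.Set.add t.2.2 s)

def pvStepB (st : List String × PySem.Set String) (w : String) :
    List String × PySem.Set String :=
  let t := w.toList.foldl pvChStep (([] : List Char), st.1, st.2)
  if PySem.Set.contains t.2.2 w then t.2
  else (t.2.1 ++ [w], PySem.Set.add t.2.2 w)

-- A's per-word step
def pvStepA (d : PySem.Dict String Bool) (w : String) : PySem.Dict String Bool :=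
  ((pvPrefs w).foldl pvCondIns d).insert w true

lemma pvKeysInsert (d : PySem.Dict String Bool) (k : String) (v : Bool) :
    (d.insert k v).keys = PySem.Set.add d.keys k := by
  rcases h : d.contains k with _|_
  · rw [PySem.Dict.keys_insert_of_not_contains d v h]
    simp [PySem.Set.add, (PySem.Dict.contains_iff_mem_keys d k).symm, h]
  · rw [PySem.Dict.keys_insert_of_contains d v h]
    simp [PySem.Set.add, ← PySem.Dict.contains_iff_mem_keys, h]

lemma pvCondFoldKeys : ∀ (ps : List String) (d : PySem.Dict String Bool),
    (ps.foldl pvCondIns d).keys = PySem.Set.update d.keys ps := by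
  intro ps
  induction ps with
  | nil => intro d; simp [PySem.Set.update_eq_foldl]
  | cons p ps ih =>
    intro d
    rw [List.foldl_cons, ih, PySem.Set.update_eq_foldl, PySem.Set.update_eq_foldl,
      List.foldl_cons]
    rcases h : d.contains p with _|_
    · simp [pvCondIns, h, pvKeysInsert]
    · have : PySem.Set.add d.keys p = d.keys := by
        simp [PySem.Set.add, ← PySem.Dict.contains_iff_mem_keys, h]
      simp [pvCondIns, h, this]

lemma pvMemUpdate : ∀ (l : List String) (s : PySem.Set String) (x : String),
    x ∈ s → x ∈ PySem.Set.update s l := by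
  intro l
  induction l with
  | nil => intro s x hx; simpa [PySem.Set.update_eq_foldl] using hx
  | cons p l ih =>
    intro s x hx
    rw [PySem.Set.update_eq_foldl, List.foldl_cons, ← PySem.Set.update_eq_foldl]
    exact ih _ _ ((PySem.Set.mem_add s p x).mpr (Or.inl hx))

lemma pvCondFoldGetSome : ∀ (ps : List String) (d : PySem.Dict String Bool) (k : String) (v : Bool),
    d.get? k = some v → (ps.foldl pvCondIns d).get? k = some v := by
  intro ps
  induction ps with
  | nil => intro d k v h; simpa using h
  | cons p ps ih =>
    intro d k v h
    rw [List.foldl_cons]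
    apply ih
    unfold pvCondIns
    rcases hc : d.contains p with _|_
    · simp only [Bool.false_eq_true, if_false]
      rcases eq_or_ne k p with rfl | hne
      · rw [PySem.Dict.contains_eq_isSome_get?, h] at hc; simp at hc
      · rwa [PySem.Dict.get?_insert_of_ne _ _ hne]
    · simpa using h

lemma pvCondFoldGetNone : ∀ (ps : List String) (d : PySem.Dict String Bool) (k : String),
    d.get? k = none →
    (ps.foldl pvCondIns d).get? k = (if k ∈ ps then some false else none) := by
  intro ps
  induction ps with
  | nil => intro d k h; simpa using h
  | cons p ps ih =>
    intro d k h
    rw [List.foldl_cons]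
    rcases eq_or_ne k p with rfl | hne
    · have hc : d.contains k = false := by
        rw [PySem.Dict.contains_eq_isSome_get?, h]; rfl
      have : pvCondIns d k = d.insert k false := by simp [pvCondIns, hc]
      rw [this]
      rw [pvCondFoldGetSome ps _ k false (PySem.Dict.get?_insert_self d k false)]
      simp
    · have hstep : (pvCondIns d p).get? k = none := by
        unfold pvCondIns
        rcases hc : d.contains p with _|_
        · simpa [hc, PySem.Dict.get?_insert_of_ne _ _ hne] using h
        · simpa [hc] using h
      rw [ih _ _ hstep]
      simp [hne]

lemma pvStepAKeys (d : PySem.Dict String Bool) (w : String) :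
    (pvStepA d w).keys = PySem.Set.add (PySem.Set.update d.keys (pvPrefs w)) w := by
  rw [pvStepA, pvKeysInsert, pvCondFoldKeys]

-- Set.add is idempotent
lemma pvAddAdd (s : PySem.Set String) (x : String) :
    PySem.Set.add (PySem.Set.add s x) x = PySem.Set.add s x := by
  by_cases h : x ∈ s
  · simp [PySem.Set.add, h]
  · simp [PySem.Set.add, h]

-- Set.contains is membership
lemma pvContainsIff (s : PySem.Set String) (x : String) :
    PySem.Set.contains s x = true ↔ x ∈ s := by
  simp [PySem.Set.contains]

-- B's character loop: the accumulator grows by the scanned chars and ordered/seen stay equal,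
-- seen being updated by the stream of prefixes of acc₀ ++ cs longer than acc₀.
lemma pvChFold : ∀ (cs : List Char) (acc : List Char) (o : List String) (s : PySem.Set String),
    o = s →
    (cs.foldl pvChStep (acc, o, s)).2.1 = (cs.foldl pvChStep (acc, o, s)).2.2 ∧
    (cs.foldl pvChStep (acc, o, s)).2.2 =
      PySem.Set.update s ((List.range cs.length).map (fun i => String.ofList (acc ++ cs.take (i + 1)))) := by
  intro cs
  induction cs with
  | nil => intro acc o s h; simp [PySem.Set.update_eq_foldl, h]
  | cons c cs ih =>
    intro acc o s h
    have hstep : pvChStep (acc, o, s) c =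
        (acc ++ [c], PySem.Set.add s (String.ofList (acc ++ [c])), PySem.Set.add s (String.ofList (acc ++ [c]))) := by
      unfold pvChStep
      rw [h]
      by_cases hm : String.ofList (acc ++ [c]) ∈ s
      · simp [PySem.Set.contains, PySem.Set.add, -String.ofList_append, hm]
      · simp [PySem.Set.contains, PySem.Set.add, -String.ofList_append, hm]
    rw [List.foldl_cons, hstep]
    obtain ⟨h1, h2⟩ := ih (acc ++ [c]) _ _ rfl
    refine ⟨h1, ?_⟩
    rw [h2]
    have hl : (List.range cs.length).map (fun i => String.ofList ((acc ++ [c]) ++ cs.take (i + 1)))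
        = (List.range cs.length).map
            ((fun i => String.ofList (acc ++ (c :: cs).take (i + 1))) ∘ Nat.succ) := by
      apply List.map_congr_left
      intro i _
      simp [List.take_succ_cons]
    rw [hl, PySem.Set.update_eq_foldl, PySem.Set.update_eq_foldl,
      List.length_cons, List.range_succ_eq_map, List.map_cons, List.map_map, List.foldl_cons]
    simp

-- B's per-word step, on states with ordered = seen
lemma pvStepBChar (st : List String × PySem.Set String) (w : String) (h : st.1 = st.2) :
    pvStepB st w = (PySem.Set.add (PySem.Set.update st.2 (pvAllPrefs w)) w,
                    PySem.Set.add (PySem.Set.update st.2 (pvAllPrefs w)) w) := by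
  unfold pvStepB
  obtain ⟨h1, h2⟩ := pvChFold w.toList [] st.1 st.2 h
  have hall : (List.range w.toList.length).map (fun i => String.ofList ([] ++ w.toList.take (i + 1)))
      = pvAllPrefs w := by
    unfold pvAllPrefs; simp
  rw [hall] at h2
  by_cases hm : w ∈ PySem.Set.update st.2 (pvAllPrefs w)
  · have hc : PySem.Set.contains (w.toList.foldl pvChStep (([] : List Char), st.1, st.2)).2.2 w = true := by
      rw [h2]; exact (pvContainsIff _ _).mpr hm
    have hadd : PySem.Set.add (PySem.Set.update st.2 (pvAllPrefs w)) w
        = PySem.Set.update st.2 (pvAllPrefs w) := by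
      simp [PySem.Set.add, hm]
    simp only [hc, if_true]
    rw [hadd]
    exact Prod.ext (h1.trans h2) h2
  · have hc : PySem.Set.contains (w.toList.foldl pvChStep (([] : List Char), st.1, st.2)).2.2 w = false := by
      rw [h2]
      simpa [PySem.Set.contains] using hm
    simp only [hc, Bool.false_eq_true, if_false]
    have hadd : PySem.Set.add (PySem.Set.update st.2 (pvAllPrefs w)) w
        = PySem.Set.update st.2 (pvAllPrefs w) ++ [w] := by
      simp [PySem.Set.add, hm]
    rw [h1, h2, hadd]

-- A's proper-prefix stream in take form
lemma pvPrefs_take (w : String) :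
    pvPrefs w = (List.range (w.toList.length - 1)).map (fun i => String.ofList (w.toList.take (i + 1))) := by
  unfold pvPrefs
  rw [PySem.List.pyRange_one, List.map_map]
  have hlen : (PySem.Str.len w : Int) - 1 - 0 = (w.toList.length : Int) - 1 := by
    simp [PySem.Str.len_eq]
  rw [hlen]
  have : ((w.toList.length : Int) - 1).toNat = w.toList.length - 1 := by omega
  rw [this]
  apply List.map_congr_left
  intro i hi
  rw [List.mem_range] at hi
  have e : (0 : Int) + (i : Int) + 1 = ((i + 1 : Nat) : Int) := by push_cast; ring
  simp only [Function.comp, e]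
  show PySem.Str.slice w none (some ((i + 1 : Nat) : Int)) = String.ofList (w.toList.take (i + 1))
  simp only [PySem.Str.slice, PySem.Chars.slice_eq_listSlice, PySem.List.slice_to_natCast]

-- both per-word steps produce the same key set/order
lemma pvKeysAgree (s : PySem.Set String) (w : String) :
    PySem.Set.add (PySem.Set.update s (pvPrefs w)) w
      = PySem.Set.add (PySem.Set.update s (pvAllPrefs w)) w := by
  rcases hn : w.toList.length with _ | m
  · have h1 : pvPrefs w = [] := by rw [pvPrefs_take, hn]; rfl
    have h2 : pvAllPrefs w = [] := by unfold pvAllPrefs; rw [hn]; rfl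
    rw [h1, h2]
  · have h2 : pvAllPrefs w = pvPrefs w ++ [w] := by
      unfold pvAllPrefs
      rw [pvPrefs_take, hn, List.range_succ, List.map_append]
      congr 1
      simp only [List.map_cons, List.map_nil]
      congr 1
      rw [← hn, List.take_of_length_le (by omega)]
      exact String.ofList_toList
    have hsplit : PySem.Set.update s (pvPrefs w ++ [w])
        = PySem.Set.add (PySem.Set.update s (pvPrefs w)) w := by
      rw [PySem.Set.update_eq_foldl, List.foldl_append, ← PySem.Set.update_eq_foldl]
      rfl
    rw [h2, hsplit, pvAddAdd]

-- main induction: A's dict fold against B's staged key list, tracking the processed words 'done'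
lemma pvMain : ∀ (rest : List String) (dA : PySem.Dict String Bool)
    (st : List String × PySem.Set String) (done : List String),
    st.1 = st.2 →
    dA.keys = st.1 →
    dA.keys.Nodup →
    (∀ s ∈ done, dA.contains s = true) →
    (∀ k v, dA.get? k = some v → v = decide (k ∈ done)) →
    (rest.foldl pvStepA dA).items
      = (rest.foldl pvStepB st).1.map (fun k => (k, decide (k ∈ done ++ rest))) := by
  intro rest
  induction rest with
  | nil =>
    intro dA st done hst hkeys hnd hcont hval
    simp only [List.foldl_nil, List.append_nil]
    rw [PySem.Dict.items_eq_map_keys dA hnd false, hkeys]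
    apply List.map_congr_left
    intro k hk
    have hcA : dA.contains k = true :=
      (PySem.Dict.contains_iff_mem_keys dA k).mpr (hkeys ▸ hk)
    rw [PySem.Dict.contains_eq_isSome_get?] at hcA
    obtain ⟨v, hv⟩ := Option.isSome_iff_exists.mp hcA
    rw [PySem.Dict.getD_of_get?_eq_some dA false hv, hval k v hv]
  | cons w rest ih =>
    intro dA st done hst hkeys hnd hcont hval
    simp only [List.foldl_cons]
    rw [pvStepBChar st w hst]
    have hkeys' : (pvStepA dA w).keys
        = PySem.Set.add (PySem.Set.update st.2 (pvAllPrefs w)) w := by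
      rw [pvStepAKeys, hkeys, hst, pvKeysAgree]
    have hnd' : (pvStepA dA w).keys.Nodup := by
      rw [pvStepAKeys]
      exact PySem.Set.nodup_add _ _ (PySem.Set.nodup_update _ _ hnd)
    have hcont' : ∀ s ∈ done ++ [w], (pvStepA dA w).contains s = true := by
      intro s hs
      rw [PySem.Dict.contains_iff_mem_keys, pvStepAKeys, PySem.Set.mem_add]
      rcases List.mem_append.mp hs with hs | hs
      · exact Or.inl (pvMemUpdate _ _ _ ((PySem.Dict.contains_iff_mem_keys dA s).mp (hcont s hs)))
      · exact Or.inr (List.mem_singleton.mp hs)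
    have hval' : ∀ k v, (pvStepA dA w).get? k = some v → v = decide (k ∈ done ++ [w]) := by
      intro k v hv
      unfold pvStepA at hv
      rcases eq_or_ne k w with rfl | hne
      · rw [PySem.Dict.get?_insert_self] at hv
        obtain rfl : true = v := Option.some_inj.mp hv
        simp
      · rw [PySem.Dict.get?_insert_of_ne _ _ hne] at hv
        rcases hd : dA.get? k with _ | v0
        · rw [pvCondFoldGetNone _ _ _ hd] at hv
          by_cases hp : k ∈ pvPrefs w
          · rw [if_pos hp] at hv
            have hkseen : k ∉ done := by
              intro hk
              have := hcont k hk
              rw [PySem.Dict.contains_eq_isSome_get?, hd] at this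
              simp at this
            simp [← Option.some_inj.mp hv, hkseen, hne]
          · rw [if_neg hp] at hv; simp at hv
        · rw [pvCondFoldGetSome _ _ _ _ hd] at hv
          have := hval k v0 hd
          subst this
          obtain rfl : decide (k ∈ done) = v := Option.some_inj.mp hv
          simp [hne]
    rw [ih (pvStepA dA w)
      (PySem.Set.add (PySem.Set.update st.2 (pvAllPrefs w)) w,
       PySem.Set.add (PySem.Set.update st.2 (pvAllPrefs w)) w)
      (done ++ [w]) rfl hkeys' hnd' hcont' hval']
    simp only [List.append_assoc, List.singleton_append]

lemma pvPortA_eq (words : List String) :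
    get_prefix_set words = (words.foldl pvStepA PySem.Dict.empty).items := by
  unfold get_prefix_set
  congr 1
  congr 1
  funext d w
  unfold pvStepA pvPrefs
  rw [List.foldl_map]
  rfl

lemma pvPortB_eq (words : List String) :
    get_prefix_set_alt words
      = (words.foldl pvStepB (([] : List String), (PySem.Set.empty : PySem.Set String))).1.map
          (fun k => (k, PySem.Set.contains (PySem.Set.ofList words) k)) := by
  rfl

-- ===== VERDICT (by name: the statement is the Claim_ definition above) =====
theorem get_prefix_set_spec : Claim_equal_get_prefix_set := by
  intro words _
  unfold Spec_get_prefix_set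
  rw [pvPortA_eq, pvPortB_eq]
  rw [pvMain words PySem.Dict.empty ([], PySem.Set.empty) [] rfl rfl (by simp)
    (by intro s hs; simp at hs)
    (by intro k v hv; rw [PySem.Dict.get?_empty] at hv; cases hv)]
  apply List.map_congr_left
  intro k _
  have hc : PySem.Set.contains (PySem.Set.ofList words) k = decide (k ∈ words) := by
    by_cases hm : k ∈ words
    · simp [PySem.Set.contains, hm, (PySem.Set.mem_ofList words k).mpr hm]
    · simp only [PySem.Set.contains]
      simp [hm, PySem.Set.mem_ofList]
  rw [hc]
  simp
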